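-- pv_equiv track=rewrite | github.com/GarmOfGnipahellir/advent-of-code | 2021/aoc/day08/part1.py | result
-- ===== SOURCE A (Python) =====
-- def result(input):
--     input = [(*[spl.split() for spl in ln.split("|")],) for ln in input]
--
--     count = 0
--     for entry in input:
--         for output in entry[1]:
--             loutput = len(output)
--             if loutput == 2 or loutput == 4 or loutput == 3 or loutput == 7:
--                 count += 1
--
--     return count
-- ===== SOURCE B (Python) =====
-- def result(input):
--     # character-level run-length state machine over the output field: no tokenization,
--     # a digit is counted when a whitespace boundary (or the end) closes a run of
--     # length 2, 3, 4 or 7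
--     count = 0
--     for ln in input:
--         run = 0
--         for ch in ln.split("|")[1]:
--             if ch.isspace():
--                 if run in (2, 3, 4, 7):
--                     count += 1
--                 run = 0
--             else:
--                 run += 1
--         if run in (2, 3, 4, 7):
--             count += 1
--     return count
-- ===== Notes on version B (the rewrite author's own statement) =====
-- stated objective: alternative
-- what changed: B never tokenizes the output field: instead of splitting it into words and testing each word's length, it runs a character-level state machine over the field, tracking the length of the current non-whitespace run and counting a digit whenever a whitespace boundary or the end of the field closes a run of length 2, 3, 4 or 7.
import Mathlib
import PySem

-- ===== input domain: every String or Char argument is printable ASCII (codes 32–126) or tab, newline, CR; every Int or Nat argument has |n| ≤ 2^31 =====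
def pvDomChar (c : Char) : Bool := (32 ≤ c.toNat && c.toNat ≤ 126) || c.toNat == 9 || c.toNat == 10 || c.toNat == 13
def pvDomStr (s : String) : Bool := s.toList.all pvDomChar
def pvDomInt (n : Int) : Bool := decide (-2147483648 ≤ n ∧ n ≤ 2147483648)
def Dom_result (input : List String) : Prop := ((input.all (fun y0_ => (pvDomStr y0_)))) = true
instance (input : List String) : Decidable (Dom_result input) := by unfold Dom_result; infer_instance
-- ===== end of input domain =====

-- B replaces A's tokenization of the output field (split into words, test each word's
-- length) by a character-level run-length state machine over the field (alternative; same cost).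

-- ===== PORT A =====
def result (input : List String) : Int :=
  let input2 := input.map (fun ln => ((PySem.Str.split? ln "|").getD []).map PySem.Str.split₀)
  input2.foldl (fun count entry =>
    match PySem.List.pyGet? entry 1 with
    | none => count        -- Python raises IndexError here; excluded by Pre_result
    | some outs =>
      outs.foldl (fun c output =>
        let loutput := PySem.Str.len output
        if loutput = 2 ∨ loutput = 4 ∨ loutput = 3 ∨ loutput = 7 then c + 1 else c) count) 0

-- ===== PORT B =====
def result_alt (input : List String) : Int :=
  input.foldl (fun count ln =>
    let field := match PySem.List.pyGet? ((PySem.Str.split? ln "|").getD []) 1 with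
                 | none => ""   -- Python raises IndexError here; excluded by Pre_result
                 | some s => s
    -- 'for ch in field' iterates the string's characters: fold over field.toList
    let st := field.toList.foldl
      (fun (p : Int × Int) ch =>
        if PySem.Chars.isspace ch then
          (if p.2 = 2 ∨ p.2 = 3 ∨ p.2 = 4 ∨ p.2 = 7 then p.1 + 1 else p.1, (0 : Int))
        else (p.1, p.2 + 1)) (count, (0 : Int))
    if st.2 = 2 ∨ st.2 = 3 ∨ st.2 = 4 ∨ st.2 = 7 then st.1 + 1 else st.1) 0

-- ===== PRECONDITION & SPEC =====
-- A (and B) raise IndexError on a line without '|' (its split has fewer than 2 fields);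
-- Pre_ requires each line to split on "|" into at least two fields, i.e. to contain a '|'.
def Pre_result (input : List String) : Prop :=
  ∀ ln ∈ input, 1 < ((PySem.Str.split? ln "|").getD []).length
instance (input : List String) : Decidable (Pre_result input) := by unfold Pre_result; infer_instance
def pvWitness_result : List String := ["ab cdef | gh abc", "| abcd"]

def Spec_result (input : List String) (out : Int) : Prop := out = result_alt input
instance (input : List String) (out : Int) : Decidable (Spec_result input out) := by unfold Spec_result; infer_instance

-- ===== CLAIM (what is proved, stated in full; the proofs are below) =====
def Claim_equal_result : Prop := ∀ (input : List String), Dom_result input → Pre_result input → Spec_result input (result input)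

-- ===== LEMMAS AND PROOFS =====
def pvP (n : Int) : Bool := n == 2 || n == 4 || n == 3 || n == 7   -- A's test order
def pvQ (n : Int) : Bool := n == 2 || n == 3 || n == 4 || n == 7   -- B's test order

-- the token-length list of one line's output field
def pvLens (ln : String) : List Int :=
  (PySem.Chars.split₀ ((((PySem.Str.split? ln "|").getD [])[1]?.getD "").toList)).map
    (fun t => (t.length : Int))

lemma pvGet1 {α : Type} (xs : List α) : PySem.List.pyGet? xs 1 = xs[1]? := by
  simp only [PySem.List.pyGet?, PySem.List.pyIdx?]
  norm_num
  split
  · rfl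
  · rename_i h
    simp [List.getElem?_eq_none (show xs.length ≤ 1 by omega)]

-- A's inner loop is a countP over the token lengths
lemma pvInner (outs : List String) (c : Int) :
    outs.foldl (fun c output =>
      let loutput := PySem.Str.len output
      if loutput = 2 ∨ loutput = 4 ∨ loutput = 3 ∨ loutput = 7 then c + 1 else c) c
    = c + (((outs.map PySem.Str.len).countP pvP : Nat) : Int) := by
  induction outs generalizing c with
  | nil => simp
  | cons x xs ih =>
    simp only [List.foldl_cons, List.map_cons, List.countP_cons, ih]
    by_cases h : PySem.Str.len x = 2 ∨ PySem.Str.len x = 4 ∨ PySem.Str.len x = 3 ∨ PySem.Str.len x = 7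
    · have hb : pvP (PySem.Str.len x) = true := by simp [pvP]; tauto
      simp only [hb, if_pos h]
      push_cast; ring
    · have hb : pvP (PySem.Str.len x) = false := by simp [pvP]; tauto
      simp only [hb, if_neg h]
      push_cast; ring

lemma pvFieldA (ln : String) (h1 : 1 < ((PySem.Str.split? ln "|").getD []).length) :
    ((((PySem.Str.split? ln "|").getD []).map PySem.Str.split₀)[1]'(by simpa using h1)).map
      PySem.Str.len = pvLens ln := by
  simp only [List.getElem_map]
  unfold pvLens
  rw [List.getElem?_eq_getElem h1]
  simp only [Option.getD_some]
  rw [← PySem.Str.split₀_map_toList, List.map_map]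
  simp [PySem.Str.len, Function.comp]

lemma pvA_fold (input : List String) (hp : ∀ ln ∈ input, 1 < ((PySem.Str.split? ln "|").getD []).length)
    (c : Int) :
    (input.map (fun ln => ((PySem.Str.split? ln "|").getD []).map PySem.Str.split₀)).foldl
      (fun count entry =>
        match PySem.List.pyGet? entry 1 with
        | none => count
        | some outs =>
          outs.foldl (fun c output =>
            let loutput := PySem.Str.len output
            if loutput = 2 ∨ loutput = 4 ∨ loutput = 3 ∨ loutput = 7 then c + 1 else c) count) c
    = c + (((input.flatMap pvLens).countP pvP : Nat) : Int) := by
  induction input generalizing c with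
  | nil => simp
  | cons ln rest ih =>
    have h1 : 1 < ((PySem.Str.split? ln "|").getD []).length := hp ln (by simp)
    have h1' : 1 < (((PySem.Str.split? ln "|").getD []).map PySem.Str.split₀).length := by
      simpa using h1
    have hsome : PySem.List.pyGet? (((PySem.Str.split? ln "|").getD []).map PySem.Str.split₀) 1
        = some ((((PySem.Str.split? ln "|").getD []).map PySem.Str.split₀)[1]'h1') := by
      rw [pvGet1, List.getElem?_eq_getElem h1']
    simp only [List.map_cons, List.foldl_cons, hsome]
    rw [ih (fun l hl => hp l (by simp [hl])), pvInner, pvFieldA ln h1]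
    simp only [List.flatMap_cons, List.countP_append]
    push_cast
    ring

-- split₀.go's accumulator is just prepended output
lemma pvGoAcc (cs cur : List Char) (acc : List (List Char)) :
    PySem.Chars.split₀.go cs cur acc = acc.reverse ++ PySem.Chars.split₀.go cs cur [] := by
  induction cs generalizing cur acc with
  | nil =>
    by_cases h : cur.isEmpty <;> simp [PySem.Chars.split₀.go, h]
  | cons ch rest ih =>
    by_cases hs : PySem.Chars.isspace ch
    · by_cases h : cur.isEmpty
      · simp only [PySem.Chars.split₀.go, hs, h, if_true]
        exact ih [] acc
      · simp only [PySem.Chars.split₀.go, hs, h, if_true, if_false, Bool.false_eq_true]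
        rw [ih [] (cur.reverse :: acc), ih [] [cur.reverse]]
        simp
    · simp only [PySem.Chars.split₀.go, hs, Bool.false_eq_true, if_false]
      exact ih (ch :: cur) acc

-- B's per-line state machine counts the tokens split₀ produces
lemma pvIfQ (c n : Int) :
    (if n = 2 ∨ n = 3 ∨ n = 4 ∨ n = 7 then c + 1 else c)
    = c + ((if pvQ n then 1 else 0 : Nat) : Int) := by
  by_cases h : n = 2 ∨ n = 3 ∨ n = 4 ∨ n = 7
  · have hb : pvQ n = true := by simp [pvQ]; tauto
    simp [h, hb]
  · have hb : pvQ n = false := by simp [pvQ]; tauto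
    simp [h, hb]

lemma pvBLine (cs : List Char) (cur : List Char) (c r : Int) (hr : r = cur.length) :
    (let st := cs.foldl
      (fun (p : Int × Int) ch =>
        if PySem.Chars.isspace ch then
          (if p.2 = 2 ∨ p.2 = 3 ∨ p.2 = 4 ∨ p.2 = 7 then p.1 + 1 else p.1, (0 : Int))
        else (p.1, p.2 + 1)) (c, r)
     if st.2 = 2 ∨ st.2 = 3 ∨ st.2 = 4 ∨ st.2 = 7 then st.1 + 1 else st.1)
    = c + ((((PySem.Chars.split₀.go cs cur []).map (fun t => (t.length : Int))).countP pvQ : Nat) : Int) := by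
  induction cs generalizing cur c r with
  | nil =>
    subst hr
    cases cur with
    | nil => simp [PySem.Chars.split₀.go]
    | cons x xs =>
      simp only [PySem.Chars.split₀.go, List.isEmpty_cons, Bool.false_eq_true, if_false,
        List.foldl_nil]
      rw [pvIfQ]
      simp [List.countP_cons]
  | cons ch rest ih =>
    by_cases hs : PySem.Chars.isspace ch
    · simp only [List.foldl_cons, hs, if_true]
      cases cur with
      | nil =>
        have hr0 : r = 0 := by simpa using hr
        have hno : ¬ (r = 2 ∨ r = 3 ∨ r = 4 ∨ r = 7) := by omega
        simp only [hno, if_false]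
        rw [ih [] c 0 (by simp)]
        simp [PySem.Chars.split₀.go, hs]
      | cons x xs =>
        rw [ih [] _ 0 (by simp), pvIfQ]
        simp only [PySem.Chars.split₀.go, hs, List.isEmpty_cons, Bool.false_eq_true, if_false,
          if_true]
        rw [pvGoAcc rest [] [(x :: xs).reverse]]
        subst hr
        simp only [List.reverse_cons, List.reverse_nil, List.nil_append, List.map_append,
          List.map_cons, List.map_nil, List.countP_append, List.countP_cons, List.countP_nil,
          List.length_append, List.length_reverse, List.length_cons, List.length_nil]
        push_cast
        ring
    · simp only [List.foldl_cons, hs, Bool.false_eq_true, if_false]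
      rw [ih (ch :: cur) c (r + 1) (by simp [hr])]
      simp [PySem.Chars.split₀.go, hs]

-- B's outer loop
lemma pvB_fold (input : List String)
    (hp : ∀ ln ∈ input, 1 < ((PySem.Str.split? ln "|").getD []).length) (c : Int) :
    input.foldl (fun count ln =>
      let field := match PySem.List.pyGet? ((PySem.Str.split? ln "|").getD []) 1 with
                   | none => ""
                   | some s => s
      let st := field.toList.foldl
        (fun (p : Int × Int) ch =>
          if PySem.Chars.isspace ch then
            (if p.2 = 2 ∨ p.2 = 3 ∨ p.2 = 4 ∨ p.2 = 7 then p.1 + 1 else p.1, (0 : Int))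
          else (p.1, p.2 + 1)) (count, (0 : Int))
      if st.2 = 2 ∨ st.2 = 3 ∨ st.2 = 4 ∨ st.2 = 7 then st.1 + 1 else st.1) c
    = c + (((input.flatMap pvLens).countP pvQ : Nat) : Int) := by
  induction input generalizing c with
  | nil => simp
  | cons ln rest ih =>
    have h1 : 1 < ((PySem.Str.split? ln "|").getD []).length := hp ln (by simp)
    have hsome : PySem.List.pyGet? ((PySem.Str.split? ln "|").getD []) 1
        = some (((PySem.Str.split? ln "|").getD [])[1]'h1) := by
      rw [pvGet1, List.getElem?_eq_getElem h1]
    simp only [List.foldl_cons, hsome]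
    rw [pvBLine _ [] _ 0 (by simp)]
    have hfield : PySem.Chars.split₀.go ((((PySem.Str.split? ln "|").getD [])[1]'h1).toList) [] []
        = PySem.Chars.split₀ ((((PySem.Str.split? ln "|").getD [])[1]?.getD "").toList) := by
      rw [List.getElem?_eq_getElem h1]
      rfl
    rw [hfield]
    rw [ih (fun l hl => hp l (by simp [hl]))]
    simp only [List.flatMap_cons, List.countP_append, pvLens]
    push_cast
    ring

lemma pvPQ : pvP = pvQ := by
  funext n
  unfold pvP pvQ
  cases h3 : (n == 3) <;> cases h4 : (n == 4) <;> simp_all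

-- ===== VERDICT (by name: the statement is the Claim_ definition above) =====
theorem result_spec : Claim_equal_result := by
  intro input _ hpre
  unfold Spec_result result result_alt
  rw [pvA_fold input hpre 0, pvB_fold input hpre 0, pvPQ]
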